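-- pv_equiv track=rewrite | github.com/Fehmeeda/piRNA_scripts | Scripts/CNN_weighted(connectivity)_kmer_overlapping.py | generate_valid_kmers
-- ===== SOURCE A (Python) =====
-- from itertools import product
--
-- def generate_valid_kmers(k=3, alphabet="ACGT"):
--     all_kmers = ["".join(p) for p in product(alphabet, repeat=k)]
--     valid = []
--
--     for kmer in all_kmers:
--         if kmer == "N" * k:
--             valid.append(kmer)
--             continue
--         if kmer[0] == "N":
--             continue
--         if kmer[:2] == "NN":
--             continue
--         if k >= 3 and kmer[1] == "N" and kmer[2] != "N":
--             continue
--         valid.append(kmer)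
--
--     return valid
-- ===== SOURCE B (Python) =====
-- def generate_valid_kmers(k=3, alphabet="ACGT"):
--     # Build the valid k-mers directly, level by level, pruning dead branches with a
--     # 5-state automaton instead of enumerating the full product and filtering afterwards.
--     START, ALLN, SECOND, MUSTN, FREE = range(5)
--
--     def step(mode, c):
--         # next mode after reading character c, or None if the branch is dead
--         if mode == START:
--             if c == "N":
--                 return ALLN
--             return SECOND if k >= 3 else FREE
--         if mode == ALLN:
--             return ALLN if c == "N" else None
--         if mode == SECOND:
--             return MUSTN if c == "N" else FREE
--         if mode == MUSTN:
--             return FREE if c == "N" else None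
--         return FREE
--
--     frontier = [("", START)]
--     rem = k
--     while rem > 0 and frontier:
--         nxt = []
--         for prefix, mode in frontier:
--             for c in alphabet:
--                 m2 = step(mode, c)
--                 if m2 is not None:
--                     nxt.append((prefix + c, m2))
--         frontier = nxt
--         rem -= 1
--     return [prefix for prefix, _ in frontier]
-- ===== Notes on version B (the rewrite author's own statement) =====
-- stated objective: alternative
-- what changed: B builds valid k-mers directly, growing a frontier of (prefix, state) pairs level by level under a 5-state pruning automaton (START/ALLN/SECOND/MUSTN/FREE), instead of A's enumeration of the full |alphabet|^k product followed by a filtering pass.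
import Mathlib
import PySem

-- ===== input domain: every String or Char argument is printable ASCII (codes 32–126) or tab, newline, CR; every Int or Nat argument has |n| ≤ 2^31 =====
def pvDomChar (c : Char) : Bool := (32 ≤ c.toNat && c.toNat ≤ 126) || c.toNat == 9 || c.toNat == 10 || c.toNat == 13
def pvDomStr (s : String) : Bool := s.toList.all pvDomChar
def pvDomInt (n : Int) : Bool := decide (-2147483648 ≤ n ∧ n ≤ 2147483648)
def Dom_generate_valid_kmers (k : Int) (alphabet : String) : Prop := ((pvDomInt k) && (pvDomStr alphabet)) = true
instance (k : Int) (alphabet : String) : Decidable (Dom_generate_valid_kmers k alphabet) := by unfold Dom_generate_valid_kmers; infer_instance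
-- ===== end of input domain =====

-- B replaces A's full product-then-filter enumeration by a pruned DFS driven by a
-- 5-state automaton, extending prefixes character by character (objective: alternative).

-- ===== PORT A =====
-- itertools.product(alphabet, repeat=n), each tuple as its list of code points,
-- in CPython's product order (first coordinate varies slowest)
def pvProdA (L : List Char) : Nat → List (List Char)
  | 0 => [[]]
  | n + 1 => L.flatMap (fun c => (pvProdA L n).map (fun p => c :: p))

-- for k < 0 Python's product(…, repeat=k) raises ValueError (excluded by Pre_);
-- k.toNat equals k on the admitted inputs.  "".join(p) over 1-char strings is String.ofList.
def generate_valid_kmers (k : Int) (alphabet : String) : List String :=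
  -- all_kmers, then the filtering for-loop over it
  ((pvProdA alphabet.toList k.toNat).map (fun p => String.ofList p)).foldl (fun valid kmer =>
    if kmer = String.ofList (PySem.List.pyRepeat ['N'] k) then valid ++ [kmer]
    else if PySem.Str.pyGet? kmer 0 = some 'N' then valid
    else if PySem.Str.slice kmer none (some 2) = String.ofList ['N', 'N'] then valid
    else if 3 ≤ k ∧ PySem.Str.pyGet? kmer 1 = some 'N' ∧ ¬ PySem.Str.pyGet? kmer 2 = some 'N' then valid
    else valid ++ [kmer]) []

-- ===== PORT B =====
-- modes: 0 = START, 1 = ALLN, 2 = SECOND, 3 = MUSTN, 4 = FREE (as in Source B)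
def pvStep (k : Int) (mode : Nat) (c : Char) : Option Nat :=
  if mode = 0 then (if c = 'N' then some 1 else if 3 ≤ k then some 2 else some 4)
  else if mode = 1 then (if c = 'N' then some 1 else none)
  else if mode = 2 then (if c = 'N' then some 3 else some 4)
  else if mode = 3 then (if c = 'N' then some 4 else none)
  else some 4

-- one iteration of the while-loop body: the two nested for-loops filling nxt;
-- a Python prefix string is carried as its code-point list (prefix + c is list append)
def pvLevel (k : Int) (L : List Char) (frontier : List (List Char × Nat)) : List (List Char × Nat) :=
  frontier.foldl (fun nxt pm =>
    L.foldl (fun nxt c =>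
      match pvStep k pm.2 c with
      | some m2 => nxt ++ [(pm.1 ++ [c], m2)]
      | none => nxt) nxt) []

-- while rem > 0 and frontier: frontier = <one level>; rem -= 1
def pvLoop (k : Int) (L : List Char) (frontier : List (List Char × Nat)) (rem : Int) :
    List (List Char × Nat) :=
  if _h : 0 < rem ∧ frontier ≠ [] then pvLoop k L (pvLevel k L frontier) (rem - 1)
  else frontier
  termination_by rem.toNat
  decreasing_by omega

def generate_valid_kmers_alt (k : Int) (alphabet : String) : List String :=
  (pvLoop k alphabet.toList [([], 0)] k).map (fun pm => String.ofList pm.1)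

-- ===== PRECONDITION & SPEC =====
-- Pre_ excludes k < 0, where A's product(…, repeat=k) raises ValueError
def Pre_generate_valid_kmers (k : Int) (alphabet : String) : Prop := 0 ≤ k
instance (k : Int) (alphabet : String) : Decidable (Pre_generate_valid_kmers k alphabet) := by unfold Pre_generate_valid_kmers; infer_instance
def pvWitness_generate_valid_kmers : Int × String := (3, "ACGT")

def Spec_generate_valid_kmers (k : Int) (alphabet : String) (out : List String) : Prop := out = generate_valid_kmers_alt k alphabet
instance (k : Int) (alphabet : String) (out : List String) : Decidable (Spec_generate_valid_kmers k alphabet out) := by unfold Spec_generate_valid_kmers; infer_instance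

-- ===== CLAIM (what is proved, stated in full; the proofs are below) =====
def Claim_equal_generate_valid_kmers : Prop := ∀ (k : Int) (alphabet : String), Dom_generate_valid_kmers k alphabet → Pre_generate_valid_kmers k alphabet → Spec_generate_valid_kmers k alphabet (generate_valid_kmers k alphabet)

-- ===== LEMMAS AND PROOFS =====

-- proof-side recursive (DFS) reading of the automaton; B's while-loop is proved
-- equal to it below, and it in turn is compared with A's product-and-filter
def pvGo (k : Int) (L : List Char) (pre : List Char) (mode : Nat) (rem : Int) : List (List Char) :=
  if _h : rem ≤ 0 then [pre]
  else L.foldl (fun out c =>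
      match pvStep k mode c with
      | some m2 => out ++ pvGo k L (pre ++ [c]) m2 (rem - 1)
      | none => out) []
  termination_by rem.toNat
  decreasing_by omega

-- the same DFS carrying the (prefix, mode) pairs that pvLoop's frontier carries
def pvGoP (k : Int) (L : List Char) (pm : List Char × Nat) (rem : Int) : List (List Char × Nat) :=
  if _h : rem ≤ 0 then [pm]
  else L.flatMap (fun c =>
    match pvStep k pm.2 c with
    | some m2 => pvGoP k L (pm.1 ++ [c], m2) (rem - 1)
    | none => [])
  termination_by rem.toNat
  decreasing_by omega

lemma pvLevel_eq (k : Int) (L : List Char) (frontier : List (List Char × Nat)) :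
    pvLevel k L frontier = frontier.flatMap (fun pm => L.flatMap (fun c =>
      match pvStep k pm.2 c with
      | some m2 => [(pm.1 ++ [c], m2)]
      | none => [])) := by
  unfold pvLevel
  rw [PySem.List.foldl_congr_mem frontier _
      (fun nxt pm => nxt ++ L.flatMap (fun c =>
        match pvStep k pm.2 c with
        | some m2 => [(pm.1 ++ [c], m2)]
        | none => [])) []
      (by
        intro acc pm _
        rw [PySem.List.foldl_congr_mem L _
            (fun nxt c => nxt ++ (match pvStep k pm.2 c with
              | some m2 => [(pm.1 ++ [c], m2)]
              | none => [])) acc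
            (by
              intro acc2 c _
              rcases hs : pvStep k pm.2 c with _ | m2 <;> simp [hs])]
        rw [PySem.List.foldl_append_eq_flatMap])]
  rw [PySem.List.foldl_append_eq_flatMap]
  simp

lemma pvLoop_eq_goP (k : Int) (L : List Char) (n : Nat) :
    ∀ (rem : Int), rem.toNat ≤ n → ∀ (frontier : List (List Char × Nat)),
      pvLoop k L frontier rem = frontier.flatMap (fun pm => pvGoP k L pm rem) := by
  induction n with
  | zero =>
    intro rem hrem frontier
    have h0 : rem ≤ 0 := by omega
    rw [pvLoop, dif_neg (by simp; omega)]
    have : ∀ pm, pvGoP k L pm rem = [pm] := fun pm => by rw [pvGoP, dif_pos h0]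
    simp [this]
  | succ n ih =>
    intro rem hrem frontier
    by_cases hpos : 0 < rem
    · rcases frontier with _ | ⟨pm0, rest⟩
      · rw [pvLoop, dif_neg (by simp)]; simp
      · rw [pvLoop, dif_pos ⟨hpos, by simp⟩]
        rw [ih (rem - 1) (by omega), pvLevel_eq, List.flatMap_assoc]
        refine List.flatMap_congr (fun pm _ => ?_)
        rw [pvGoP, dif_neg (by omega), List.flatMap_assoc]
        refine List.flatMap_congr (fun c _ => ?_)
        rcases hs : pvStep k pm.2 c with _ | m2 <;> simp [hs]
    · rw [pvLoop, dif_neg (by simp; omega)]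
      have : ∀ pm, pvGoP k L pm rem = [pm] := fun pm => by rw [pvGoP, dif_pos (by omega)]
      simp [this]


-- the predicate A's loop keeps, at the code-point level
def pvKeep (n : Nat) (l : List Char) : Bool :=
  l == List.replicate n 'N' ||
    (!(l[0]? == some 'N') && !(decide (3 ≤ n) && l[1]? == some 'N' && !(l[2]? == some 'N')))

lemma pvGo_unfold (k : Int) (L pre : List Char) (mode : Nat) (rem : Int) (h : ¬ rem ≤ 0) :
    pvGo k L pre mode rem = L.flatMap (fun c =>
      match pvStep k mode c with
      | some m2 => pvGo k L (pre ++ [c]) m2 (rem - 1)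
      | none => []) := by
  rw [pvGo, dif_neg h]
  rw [PySem.List.foldl_congr_mem L _
      (fun out c => out ++ (match pvStep k mode c with
        | some m2 => pvGo k L (pre ++ [c]) m2 (rem - 1)
        | none => [])) []
      (by
        intro acc c _
        rcases hs : pvStep k mode c with _ | m2 <;> simp [hs])]
  rw [PySem.List.foldl_append_eq_flatMap]
  simp

lemma goP_fst (k : Int) (L : List Char) (n : Nat) :
    ∀ (rem : Int), rem.toNat ≤ n → ∀ (pm : List Char × Nat),
      (pvGoP k L pm rem).map Prod.fst = pvGo k L pm.1 pm.2 rem := by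
  induction n with
  | zero =>
    intro rem hrem pm
    have h0 : rem ≤ 0 := by omega
    rw [pvGoP, dif_pos h0, pvGo, dif_pos h0]
    simp
  | succ n ih =>
    intro rem hrem pm
    by_cases h0 : rem ≤ 0
    · rw [pvGoP, dif_pos h0, pvGo, dif_pos h0]; simp
    · rw [pvGoP, dif_neg h0, pvGo_unfold _ _ _ _ _ h0, List.map_flatMap]
      refine List.flatMap_congr (fun c _ => ?_)
      rcases hs : pvStep k pm.2 c with _ | m2 <;> simp only [hs]
      · simp
      · exact ih (rem - 1) (by omega) (pm.1 ++ [c], m2)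

set_option maxHeartbeats 1000000 in
lemma A_eq_filter (k : Int) (al : String) (hk : 0 ≤ k) :
    generate_valid_kmers k al =
      ((pvProdA al.toList k.toNat).filter (pvKeep k.toNat)).map String.ofList := by
  unfold generate_valid_kmers
  rw [List.foldl_map]
  have hfun : ∀ (acc : List String) (p : List Char),
      (if String.ofList p = String.ofList (PySem.List.pyRepeat ['N'] k) then acc ++ [String.ofList p]
       else if PySem.Str.pyGet? (String.ofList p) 0 = some 'N' then acc
       else if PySem.Str.slice (String.ofList p) none (some 2) = String.ofList ['N','N'] then acc
       else if 3 ≤ k ∧ PySem.Str.pyGet? (String.ofList p) 1 = some 'N' ∧ ¬ PySem.Str.pyGet? (String.ofList p) 2 = some 'N' then acc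
       else acc ++ [String.ofList p])
      = if pvKeep k.toNat p then acc ++ [String.ofList p] else acc := by
    intro acc p
    have h1 : (String.ofList p = String.ofList (PySem.List.pyRepeat ['N'] k)) ↔
        p = List.replicate k.toNat 'N' := by
      rw [String.ofList_inj, PySem.List.pyRepeat_singleton]
    have h0 : PySem.Str.pyGet? (String.ofList p) 0 = p[0]? := by simp [pysem]
    have hg1 : PySem.Str.pyGet? (String.ofList p) 1 = p[1]? := by simp [pysem]
    have hg2 : PySem.Str.pyGet? (String.ofList p) 2 = p[2]? := by simp [pysem]
    have hsl : (PySem.Str.slice (String.ofList p) none (some 2) = String.ofList ['N','N']) ↔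
        p.take 2 = ['N','N'] := by
      rw [← String.toList_inj]; simp [pysem]
    by_cases hrep : p = List.replicate k.toNat 'N'
    · rw [if_pos (h1.mpr hrep)]
      rw [if_pos (by simpa [pvKeep] using Or.inl (by simpa using hrep))]
    · have hrepb : (p == List.replicate k.toNat 'N') = false := by simpa using hrep
      rw [if_neg (fun h => hrep (h1.mp h))]
      by_cases hN0 : p[0]? = some 'N'
      · rw [if_pos (by rw [h0]; exact hN0)]
        have hp0 : (p[0]? == some 'N') = true := by simpa using hN0
        have hkp : pvKeep k.toNat p = false := by simp [pvKeep, hrepb, hp0]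
        rw [if_neg (by simp [hkp])]
      · have hp0 : (p[0]? == some 'N') = false := by simpa using hN0
        rw [if_neg (by rw [h0]; exact hN0)]
        have htk : ¬ (PySem.Str.slice (String.ofList p) none (some 2) = String.ofList ['N','N']) := by
          rw [hsl]
          intro h
          apply hN0
          cases p with
          | nil => simp at h
          | cons a t => simp_all
        rw [if_neg htk]
        have hkkn : (3 ≤ k) ↔ (3 ≤ k.toNat) := by omega
        by_cases hc : 3 ≤ k.toNat ∧ p[1]? = some 'N' ∧ ¬ p[2]? = some 'N'
        · rw [if_pos (by rw [hkkn, hg1, hg2]; exact hc)]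
          have b3 : decide (3 ≤ k.toNat) = true := by simpa using hc.1
          have b1 : (p[1]? == some 'N') = true := by simpa using hc.2.1
          have b2 : (p[2]? == some 'N') = false := by simpa using hc.2.2
          have hkp : pvKeep k.toNat p = false := by simp [pvKeep, hrepb, hp0, b3, b1, b2]
          rw [if_neg (by simp [hkp])]
        · rw [if_neg (by rw [hkkn, hg1, hg2]; exact hc)]
          have hkp : pvKeep k.toNat p = true := by
            simp only [pvKeep, hrepb, hp0, Bool.not_false, Bool.false_or, Bool.true_and,
              Bool.not_eq_eq_eq_not, Bool.not_true]
            cases b3 : decide (3 ≤ k.toNat) <;>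
              cases b1 : (p[1]? == some 'N') <;>
                cases b2 : (p[2]? == some 'N') <;> simp_all
          rw [if_pos hkp]
  rw [PySem.List.foldl_congr_mem _ _ _ _ (fun acc p _ => hfun acc p)]
  rw [PySem.List.foldl_append_if]
  simp

lemma go_free (k : Int) (L pre : List Char) (r : Nat) :
    pvGo k L pre 4 (r : Int) = (pvProdA L r).map (fun p => pre ++ p) := by
  induction r generalizing pre with
  | zero => rw [pvGo]; simp [pvProdA]
  | succ r ih =>
    rw [pvGo_unfold _ _ _ _ _ (by omega)]
    have hr : ((r + 1 : Nat) : Int) - 1 = (r : Int) := by push_cast; ring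
    simp only [hr, show ∀ c, pvStep k 4 c = some 4 from fun _ => rfl]
    simp only [pvProdA, List.map_flatMap, List.map_map]
    refine List.flatMap_congr (fun c _ => ?_)
    rw [ih, show ((fun p => pre ++ p) ∘ fun p => c :: p) = (fun p => (pre ++ [c]) ++ p) from
      funext fun p => by simp]

lemma go_allN (k : Int) (L pre : List Char) (r : Nat) :
    pvGo k L pre 1 (r : Int) =
      ((pvProdA L r).filter (fun l => l == List.replicate r 'N')).map (fun p => pre ++ p) := by
  induction r generalizing pre with
  | zero => rw [pvGo]; simp [pvProdA]
  | succ r ih =>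
    rw [pvGo_unfold _ _ _ _ _ (by omega)]
    have hr : ((r + 1 : Nat) : Int) - 1 = (r : Int) := by push_cast; ring
    simp only [hr]
    simp only [pvProdA, List.filter_flatMap, List.filter_map, List.map_flatMap, List.map_map]
    refine List.flatMap_congr (fun c _ => ?_)
    by_cases hc : c = 'N'
    · subst hc
      simp only [show pvStep k 1 'N' = some 1 from rfl]
      rw [show ((fun l => l == List.replicate (r + 1) 'N') ∘ fun p => 'N' :: p)
            = (fun l => l == List.replicate r 'N') from funext fun p => by
          simp only [Function.comp]; rw [Bool.eq_iff_iff]; simp [List.replicate_succ]]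
      rw [ih, show ((fun p => pre ++ p) ∘ fun p => 'N' :: p) = (fun p => (pre ++ ['N']) ++ p) from
        funext fun p => by simp]
    · simp only [show pvStep k 1 c = none from by simp [pvStep, hc]]
      rw [show ((fun l => l == List.replicate (r + 1) 'N') ∘ fun p => c :: p)
            = (fun _ => false) from funext fun p => by
          simp [Function.comp, List.replicate_succ, hc]]
      simp

lemma go_mustN (k : Int) (L pre : List Char) (r : Nat) :
    pvGo k L pre 3 ((r : Int) + 1) =
      ((pvProdA L (r + 1)).filter (fun l => l[0]? == some 'N')).map (fun p => pre ++ p) := by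
  rw [pvGo_unfold _ _ _ _ _ (by omega)]
  have hr : ((r : Int) + 1) - 1 = (r : Int) := by ring
  simp only [hr]
  simp only [pvProdA, List.filter_flatMap, List.filter_map, List.map_flatMap, List.map_map]
  refine List.flatMap_congr (fun c _ => ?_)
  by_cases hc : c = 'N'
  · subst hc
    simp only [show pvStep k 3 'N' = some 4 from rfl]
    rw [show ((fun l : List Char => l[0]? == some 'N') ∘ fun p => 'N' :: p)
          = (fun _ => true) from funext fun p => by simp [Function.comp]]
    rw [List.filter_true, go_free,
      show ((fun p => pre ++ p) ∘ fun p => 'N' :: p) = (fun p => (pre ++ ['N']) ++ p) from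
        funext fun p => by simp]
  · simp only [show pvStep k 3 c = none from by simp [pvStep, hc]]
    rw [show ((fun l : List Char => l[0]? == some 'N') ∘ fun p => c :: p)
          = (fun _ => false) from funext fun p => by simp [Function.comp, hc]]
    simp

lemma go_second (k : Int) (L pre : List Char) (r : Nat) :
    pvGo k L pre 2 ((r : Int) + 2) =
      ((pvProdA L (r + 2)).filter
        (fun l => !(l[0]? == some 'N' && !(l[1]? == some 'N')))).map (fun p => pre ++ p) := by
  rw [pvGo_unfold _ _ _ _ _ (by omega)]
  have hr : ((r : Int) + 2) - 1 = ((r : Int) + 1) := by ring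
  simp only [hr]
  have hprod : pvProdA L (r + 2) = L.flatMap (fun c => (pvProdA L (r + 1)).map (fun p => c :: p)) := rfl
  rw [hprod]
  simp only [List.filter_flatMap, List.filter_map, List.map_flatMap, List.map_map]
  refine List.flatMap_congr (fun c _ => ?_)
  by_cases hc : c = 'N'
  · subst hc
    simp only [show pvStep k 2 'N' = some 3 from rfl]
    rw [show ((fun l : List Char => !(l[0]? == some 'N' && !(l[1]? == some 'N'))) ∘ fun p => 'N' :: p)
          = (fun l : List Char => l[0]? == some 'N') from funext fun p => by
        simp [Function.comp]]
    rw [go_mustN,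
      show ((fun p => pre ++ p) ∘ fun p => 'N' :: p) = (fun p => (pre ++ ['N']) ++ p) from
        funext fun p => by simp]
  · simp only [show pvStep k 2 c = some 4 from by simp [pvStep, hc]]
    rw [show ((fun l : List Char => !(l[0]? == some 'N' && !(l[1]? == some 'N'))) ∘ fun p => c :: p)
          = (fun _ => true) from funext fun p => by simp [Function.comp, hc]]
    rw [show (r : Int) + 1 = ((r + 1 : Nat) : Int) from by push_cast; ring]
    rw [List.filter_true, go_free,
      show ((fun p => pre ++ p) ∘ fun p => c :: p) = (fun p => (pre ++ [c]) ++ p) from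
        funext fun p => by simp]

lemma go_start (k : Int) (L pre : List Char) (hk : 0 ≤ k) :
    pvGo k L pre 0 k = ((pvProdA L k.toNat).filter (pvKeep k.toNat)).map (fun p => pre ++ p) := by
  by_cases h0 : k = 0
  · subst h0; rw [pvGo]; simp [pvProdA, pvKeep]
  · obtain ⟨m, hm⟩ : ∃ m, k.toNat = m + 1 := ⟨k.toNat - 1, by omega⟩
    rw [pvGo_unfold _ _ _ _ _ (by omega)]
    simp only [hm, pvProdA, List.filter_flatMap, List.filter_map, List.map_flatMap, List.map_map]
    refine List.flatMap_congr (fun c _ => ?_)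
    by_cases hc : c = 'N'
    · subst hc
      simp only [show pvStep k 0 'N' = some 1 from rfl,
        show k - 1 = ((m : Nat) : Int) from by omega]
      rw [show (pvKeep (m + 1) ∘ fun p => 'N' :: p) = (fun l => l == List.replicate m 'N') from
        funext fun p => by
          simp only [Function.comp, pvKeep, List.getElem?_cons_zero, beq_self_eq_true,
            Bool.not_true, Bool.false_and, Bool.or_false]
          rw [Bool.eq_iff_iff]; simp [List.replicate_succ]]
      rw [go_allN,
        show ((fun p => pre ++ p) ∘ fun p => 'N' :: p) = (fun p => (pre ++ ['N']) ++ p) from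
          funext fun p => by simp]
    · have hcb : (c == 'N') = false := by simpa using hc
      by_cases h3 : 3 ≤ k
      · have h3n : decide (3 ≤ m + 1) = true := by simp; omega
        obtain ⟨r2, hr2⟩ : ∃ j, m = j + 2 := ⟨m - 2, by omega⟩
        simp only [show pvStep k 0 c = some 2 from by simp [pvStep, hc, h3],
          show k - 1 = ((r2 : Nat) : Int) + 2 from by omega, hr2]
        rw [show (pvKeep (r2 + 2 + 1) ∘ fun p => c :: p)
              = (fun l : List Char => !(l[0]? == some 'N' && !(l[1]? == some 'N'))) from
          funext fun p => by
            simp [Function.comp, pvKeep, List.replicate_succ, hcb]]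
        rw [go_second,
          show ((fun p => pre ++ p) ∘ fun p => c :: p) = (fun p => (pre ++ [c]) ++ p) from
            funext fun p => by simp]
      · have h3n : decide (3 ≤ m + 1) = false := by simp; omega
        simp only [show pvStep k 0 c = some 4 from by simp [pvStep, hc, h3],
          show k - 1 = ((m : Nat) : Int) from by omega]
        rw [show (pvKeep (m + 1) ∘ fun p => c :: p) = (fun _ => true) from
          funext fun p => by
            simp [Function.comp, pvKeep, List.replicate_succ, hcb]
            exact Or.inl (Or.inl (by omega))]
        rw [List.filter_true, go_free,
          show ((fun p => pre ++ p) ∘ fun p => c :: p) = (fun p => (pre ++ [c]) ++ p) from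
            funext fun p => by simp]

-- ===== VERDICT (by name: the statement is the Claim_ definition above) =====
theorem generate_valid_kmers_spec : Claim_equal_generate_valid_kmers := by
  intro k al _ hk
  unfold Spec_generate_valid_kmers generate_valid_kmers_alt
  rw [pvLoop_eq_goP k al.toList k.toNat k (by omega)]
  have h1 : ([([], (0 : Nat))] : List (List Char × Nat)).flatMap
      (fun pm => pvGoP k al.toList pm k) = pvGoP k al.toList ([], 0) k := by simp
  rw [h1]
  have h2 : (pvGoP k al.toList ([], 0) k).map (fun pm => String.ofList pm.1)
      = ((pvGoP k al.toList ([], 0) k).map Prod.fst).map String.ofList := by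
    rw [List.map_map]; rfl
  rw [h2, goP_fst k al.toList k.toNat k (by omega) ([], 0)]
  rw [go_start k al.toList [] hk, A_eq_filter k al hk]
  simp
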